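-- pv_equiv track=rewrite | github.com/398494308/Quant-test-2 | src/research_v2/journal.py | _system_cluster_key_from_regions
-- ===== SOURCE A (Python) =====
-- def _system_cluster_key_from_regions(
--     changed_regions: set[str] | tuple[str, ...] | list[str],
--     ordinary_region_families_set: set[str] | tuple[str, ...] | list[str],
-- ) -> str:
--     region_set = {
--         str(item).strip()
--         for item in changed_regions
--         if str(item).strip()
--     }
--     family_set = {
--         str(item).strip()
--         for item in ordinary_region_families_set
--         if str(item).strip()
--     }
--     if region_set & {"_is_sideways_regime", "_sideways_release_flags"}:
--         return "sideways_cluster"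
--     if region_set & {"_flow_signal_metrics", "_flow_confirmation_ok", "_flow_entry_ok"}:
--         return "trigger_efficiency_cluster"
--     if region_set & {"breakdown_ready", "short_breakdown_ok", "short_bounce_fail_ok"}:
--         return "post_breakdown_cluster"
--     if region_set & {"long_final_veto_clear", "short_final_veto_clear", "_trend_followthrough_long", "_trend_followthrough_short"}:
--         return "ownership_cluster"
--     if region_set & {"long_outer_context_ok", "short_outer_context_ok"}:
--         return "participation_cluster"
--     if region_set & {"long_breakout_ok", "long_pullback_ok", "long_signal_path_ok", "_long_entry_signal", "_short_entry_signal"}: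
--         return "trigger_efficiency_cluster"
--     if family_set == {"sideways"}:
--         return "sideways_cluster"
--     return ""
-- ===== SOURCE B (Python) =====
-- # B: single pass with a constant rank dict (no set construction); tracks the minimum-rank
-- # hit over changed_regions, then a boolean pass over ordinary_region_families_set.
-- _RANK = {
--     "_is_sideways_regime": (0, "sideways_cluster"),
--     "_sideways_release_flags": (0, "sideways_cluster"),
--     "_flow_signal_metrics": (1, "trigger_efficiency_cluster"),
--     "_flow_confirmation_ok": (1, "trigger_efficiency_cluster"),
--     "_flow_entry_ok": (1, "trigger_efficiency_cluster"),
--     "breakdown_ready": (2, "post_breakdown_cluster"),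
--     "short_breakdown_ok": (2, "post_breakdown_cluster"),
--     "short_bounce_fail_ok": (2, "post_breakdown_cluster"),
--     "long_final_veto_clear": (3, "ownership_cluster"),
--     "short_final_veto_clear": (3, "ownership_cluster"),
--     "_trend_followthrough_long": (3, "ownership_cluster"),
--     "_trend_followthrough_short": (3, "ownership_cluster"),
--     "long_outer_context_ok": (4, "participation_cluster"),
--     "short_outer_context_ok": (4, "participation_cluster"),
--     "long_breakout_ok": (5, "trigger_efficiency_cluster"),
--     "long_pullback_ok": (5, "trigger_efficiency_cluster"),
--     "long_signal_path_ok": (5, "trigger_efficiency_cluster"),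
--     "_long_entry_signal": (5, "trigger_efficiency_cluster"),
--     "_short_entry_signal": (5, "trigger_efficiency_cluster"),
-- }
--
--
-- def _system_cluster_key_from_regions(changed_regions, ordinary_region_families_set):
--     best = None
--     for item in changed_regions:
--         hit = _RANK.get(str(item).strip())
--         if hit is not None and (best is None or hit[0] < best[0]):
--             best = hit
--     if best is not None:
--         return best[1]
--     saw_sideways = False
--     saw_other = False
--     for item in ordinary_region_families_set:
--         name = str(item).strip()
--         if name == "sideways":
--             saw_sideways = True
--         elif name:
--             saw_other = True
--     return "sideways_cluster" if saw_sideways and not saw_other else ""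
-- ===== Notes on version B (the rewrite author's own statement) =====
-- stated objective: alternative
-- what changed: A builds two sanitized sets and tests six set intersections in branch order; B replaces that by one constant dict mapping each trigger name to a (rank, key) pair, a single min-rank pass over changed_regions, and a two-boolean-flag pass over the family list instead of a set-equality test.
import Mathlib
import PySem

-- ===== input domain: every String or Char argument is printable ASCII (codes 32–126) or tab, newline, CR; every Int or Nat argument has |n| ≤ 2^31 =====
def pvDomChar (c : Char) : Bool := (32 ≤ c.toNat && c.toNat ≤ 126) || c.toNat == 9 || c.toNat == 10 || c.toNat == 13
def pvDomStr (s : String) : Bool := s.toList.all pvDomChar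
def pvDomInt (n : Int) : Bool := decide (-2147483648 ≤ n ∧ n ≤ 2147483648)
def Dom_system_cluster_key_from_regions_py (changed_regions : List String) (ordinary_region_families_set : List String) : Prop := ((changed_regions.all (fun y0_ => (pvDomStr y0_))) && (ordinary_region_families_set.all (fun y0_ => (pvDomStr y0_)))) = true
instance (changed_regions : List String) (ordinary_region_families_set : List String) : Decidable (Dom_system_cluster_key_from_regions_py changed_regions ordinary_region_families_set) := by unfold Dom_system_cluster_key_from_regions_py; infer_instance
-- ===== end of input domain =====

-- B replaces A's six set-intersection branches by one constant rank dict and a single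
-- min-rank pass over changed_regions, plus a two-flag pass over the family list (objective: alternative).

-- ===== PORT A =====
def system_cluster_key_from_regions_py (changed_regions : List String) (ordinary_region_families_set : List String) : String :=
  let region_set : PySem.Set String :=
    PySem.Set.ofList ((changed_regions.map (fun item => PySem.Str.strip item)).filter (fun s => !(s == "")))
  let family_set : PySem.Set String :=
    PySem.Set.ofList ((ordinary_region_families_set.map (fun item => PySem.Str.strip item)).filter (fun s => !(s == "")))
  if PySem.Set.inter region_set ["_is_sideways_regime", "_sideways_release_flags"] ≠ [] then "sideways_cluster"
  else if PySem.Set.inter region_set ["_flow_signal_metrics", "_flow_confirmation_ok", "_flow_entry_ok"] ≠ [] then "trigger_efficiency_cluster"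
  else if PySem.Set.inter region_set ["breakdown_ready", "short_breakdown_ok", "short_bounce_fail_ok"] ≠ [] then "post_breakdown_cluster"
  else if PySem.Set.inter region_set ["long_final_veto_clear", "short_final_veto_clear", "_trend_followthrough_long", "_trend_followthrough_short"] ≠ [] then "ownership_cluster"
  else if PySem.Set.inter region_set ["long_outer_context_ok", "short_outer_context_ok"] ≠ [] then "participation_cluster"
  else if PySem.Set.inter region_set ["long_breakout_ok", "long_pullback_ok", "long_signal_path_ok", "_long_entry_signal", "_short_entry_signal"] ≠ [] then "trigger_efficiency_cluster"
  else if PySem.Set.equal family_set ["sideways"] then "sideways_cluster"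
  else ""

-- ===== PORT B =====
def pvB_rank : PySem.Dict String (Int × String) := PySem.Dict.ofList
  [ ("_is_sideways_regime", (0, "sideways_cluster"))
  , ("_sideways_release_flags", (0, "sideways_cluster"))
  , ("_flow_signal_metrics", (1, "trigger_efficiency_cluster"))
  , ("_flow_confirmation_ok", (1, "trigger_efficiency_cluster"))
  , ("_flow_entry_ok", (1, "trigger_efficiency_cluster"))
  , ("breakdown_ready", (2, "post_breakdown_cluster"))
  , ("short_breakdown_ok", (2, "post_breakdown_cluster"))
  , ("short_bounce_fail_ok", (2, "post_breakdown_cluster"))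
  , ("long_final_veto_clear", (3, "ownership_cluster"))
  , ("short_final_veto_clear", (3, "ownership_cluster"))
  , ("_trend_followthrough_long", (3, "ownership_cluster"))
  , ("_trend_followthrough_short", (3, "ownership_cluster"))
  , ("long_outer_context_ok", (4, "participation_cluster"))
  , ("short_outer_context_ok", (4, "participation_cluster"))
  , ("long_breakout_ok", (5, "trigger_efficiency_cluster"))
  , ("long_pullback_ok", (5, "trigger_efficiency_cluster"))
  , ("long_signal_path_ok", (5, "trigger_efficiency_cluster"))
  , ("_long_entry_signal", (5, "trigger_efficiency_cluster"))
  , ("_short_entry_signal", (5, "trigger_efficiency_cluster")) ]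

-- 'if hit is not None and (best is None or hit[0] < best[0]): best = hit'
def pvB_bestStep (best : Option (Int × String)) (item : String) : Option (Int × String) :=
  match PySem.Dict.get? pvB_rank (PySem.Str.strip item) with
  | none => best
  | some hit =>
    match best with
    | none => some hit
    | some b => if hit.1 < b.1 then some hit else some b

-- 'if name == "sideways": saw_sideways = True; elif name: saw_other = True'
def pvB_famStep (s : Bool × Bool) (item : String) : Bool × Bool :=
  let name := PySem.Str.strip item
  if name == "sideways" then (true, s.2)
  else if name == "" then s
  else (s.1, true)

def system_cluster_key_from_regions_py_alt (changed_regions : List String) (ordinary_region_families_set : List String) : String :=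
  match changed_regions.foldl pvB_bestStep none with
  | some best => best.2
  | none =>
    let fam := ordinary_region_families_set.foldl pvB_famStep (false, false)
    if fam.1 && !fam.2 then "sideways_cluster" else ""

-- ===== PRECONDITION & SPEC =====
def Spec_system_cluster_key_from_regions_py (changed_regions : List String) (ordinary_region_families_set : List String) (out : String) : Prop := out = system_cluster_key_from_regions_py_alt changed_regions ordinary_region_families_set
instance (changed_regions : List String) (ordinary_region_families_set : List String) (out : String) : Decidable (Spec_system_cluster_key_from_regions_py changed_regions ordinary_region_families_set out) := by unfold Spec_system_cluster_key_from_regions_py; infer_instance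

-- ===== CLAIM (what is proved, stated in full; the proofs are below) =====
def Claim_equal_system_cluster_key_from_regions_py : Prop := ∀ (changed_regions : List String) (ordinary_region_families_set : List String), Dom_system_cluster_key_from_regions_py changed_regions ordinary_region_families_set → Spec_system_cluster_key_from_regions_py changed_regions ordinary_region_families_set (system_cluster_key_from_regions_py changed_regions ordinary_region_families_set)

-- ===== LEMMAS AND PROOFS =====

def pvG0 : List String := ["_is_sideways_regime", "_sideways_release_flags"]
def pvG1 : List String := ["_flow_signal_metrics", "_flow_confirmation_ok", "_flow_entry_ok"]
def pvG2 : List String := ["breakdown_ready", "short_breakdown_ok", "short_bounce_fail_ok"]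
def pvG3 : List String := ["long_final_veto_clear", "short_final_veto_clear", "_trend_followthrough_long", "_trend_followthrough_short"]
def pvG4 : List String := ["long_outer_context_ok", "short_outer_context_ok"]
def pvG5 : List String := ["long_breakout_ok", "long_pullback_ok", "long_signal_path_ok", "_long_entry_signal", "_short_entry_signal"]

-- the dict lookup as a group-membership if-chain
def pvRankIf (s : String) : Option (Int × String) :=
  if pvG0.contains s then some (0, "sideways_cluster")
  else if pvG1.contains s then some (1, "trigger_efficiency_cluster")
  else if pvG2.contains s then some (2, "post_breakdown_cluster")
  else if pvG3.contains s then some (3, "ownership_cluster")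
  else if pvG4.contains s then some (4, "participation_cluster")
  else if pvG5.contains s then some (5, "trigger_efficiency_cluster")
  else none

def pvCond (g : List String) (xs : List String) : Bool :=
  xs.any (fun it => g.contains (PySem.Str.strip it))

def pvMinOpt (a b : Option (Int × String)) : Option (Int × String) :=
  match a, b with
  | none, b => b
  | some a, none => some a
  | some a, some b => if b.1 < a.1 then some b else some a

def pvSpecMin (xs : List String) : Option (Int × String) :=
  if pvCond pvG0 xs then some (0, "sideways_cluster")
  else if pvCond pvG1 xs then some (1, "trigger_efficiency_cluster")
  else if pvCond pvG2 xs then some (2, "post_breakdown_cluster")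
  else if pvCond pvG3 xs then some (3, "ownership_cluster")
  else if pvCond pvG4 xs then some (4, "participation_cluster")
  else if pvCond pvG5 xs then some (5, "trigger_efficiency_cluster")
  else none

theorem pvRankChar (s : String) : PySem.Dict.get? pvB_rank s = pvRankIf s := by
  have hItems : pvB_rank.items = [ ("_is_sideways_regime", (0, "sideways_cluster"))
  , ("_sideways_release_flags", (0, "sideways_cluster"))
  , ("_flow_signal_metrics", (1, "trigger_efficiency_cluster"))
  , ("_flow_confirmation_ok", (1, "trigger_efficiency_cluster"))
  , ("_flow_entry_ok", (1, "trigger_efficiency_cluster"))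
  , ("breakdown_ready", (2, "post_breakdown_cluster"))
  , ("short_breakdown_ok", (2, "post_breakdown_cluster"))
  , ("short_bounce_fail_ok", (2, "post_breakdown_cluster"))
  , ("long_final_veto_clear", (3, "ownership_cluster"))
  , ("short_final_veto_clear", (3, "ownership_cluster"))
  , ("_trend_followthrough_long", (3, "ownership_cluster"))
  , ("_trend_followthrough_short", (3, "ownership_cluster"))
  , ("long_outer_context_ok", (4, "participation_cluster"))
  , ("short_outer_context_ok", (4, "participation_cluster"))
  , ("long_breakout_ok", (5, "trigger_efficiency_cluster"))
  , ("long_pullback_ok", (5, "trigger_efficiency_cluster"))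
  , ("long_signal_path_ok", (5, "trigger_efficiency_cluster"))
  , ("_long_entry_signal", (5, "trigger_efficiency_cluster"))
  , ("_short_entry_signal", (5, "trigger_efficiency_cluster")) ] := by decide
  by_cases h0 : s = "_is_sideways_regime"
  · subst h0; decide
  by_cases h1 : s = "_sideways_release_flags"
  · subst h1; decide
  by_cases h2 : s = "_flow_signal_metrics"
  · subst h2; decide
  by_cases h3 : s = "_flow_confirmation_ok"
  · subst h3; decide
  by_cases h4 : s = "_flow_entry_ok"
  · subst h4; decide
  by_cases h5 : s = "breakdown_ready"
  · subst h5; decide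
  by_cases h6 : s = "short_breakdown_ok"
  · subst h6; decide
  by_cases h7 : s = "short_bounce_fail_ok"
  · subst h7; decide
  by_cases h8 : s = "long_final_veto_clear"
  · subst h8; decide
  by_cases h9 : s = "short_final_veto_clear"
  · subst h9; decide
  by_cases h10 : s = "_trend_followthrough_long"
  · subst h10; decide
  by_cases h11 : s = "_trend_followthrough_short"
  · subst h11; decide
  by_cases h12 : s = "long_outer_context_ok"
  · subst h12; decide
  by_cases h13 : s = "short_outer_context_ok"
  · subst h13; decide
  by_cases h14 : s = "long_breakout_ok"
  · subst h14; decide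
  by_cases h15 : s = "long_pullback_ok"
  · subst h15; decide
  by_cases h16 : s = "long_signal_path_ok"
  · subst h16; decide
  by_cases h17 : s = "_long_entry_signal"
  · subst h17; decide
  by_cases h18 : s = "_short_entry_signal"
  · subst h18; decide
  simp [hItems, PySem.Dict.get?, List.find?, pvRankIf, pvG0, pvG1, pvG2, pvG3, pvG4, pvG5, h0, h1, h2, h3, h4, h5, h6, h7, h8, h9, h10, h11, h12, h13, h14, h15, h16, h17, h18,
    beq_eq_false_iff_ne.mpr (Ne.symm h0),
    beq_eq_false_iff_ne.mpr (Ne.symm h1),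
    beq_eq_false_iff_ne.mpr (Ne.symm h2),
    beq_eq_false_iff_ne.mpr (Ne.symm h3),
    beq_eq_false_iff_ne.mpr (Ne.symm h4),
    beq_eq_false_iff_ne.mpr (Ne.symm h5),
    beq_eq_false_iff_ne.mpr (Ne.symm h6),
    beq_eq_false_iff_ne.mpr (Ne.symm h7),
    beq_eq_false_iff_ne.mpr (Ne.symm h8),
    beq_eq_false_iff_ne.mpr (Ne.symm h9),
    beq_eq_false_iff_ne.mpr (Ne.symm h10),
    beq_eq_false_iff_ne.mpr (Ne.symm h11),
    beq_eq_false_iff_ne.mpr (Ne.symm h12),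
    beq_eq_false_iff_ne.mpr (Ne.symm h13),
    beq_eq_false_iff_ne.mpr (Ne.symm h14),
    beq_eq_false_iff_ne.mpr (Ne.symm h15),
    beq_eq_false_iff_ne.mpr (Ne.symm h16),
    beq_eq_false_iff_ne.mpr (Ne.symm h17),
    beq_eq_false_iff_ne.mpr (Ne.symm h18)]

theorem pvStepEq (acc : Option (Int × String)) (it : String) :
    pvB_bestStep acc it = pvMinOpt acc (pvRankIf (PySem.Str.strip it)) := by
  simp only [pvB_bestStep, pvRankChar]
  cases pvRankIf (PySem.Str.strip it) <;> cases acc <;> simp [pvMinOpt]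

theorem pvMinOpt_assoc (a b c : Option (Int × String)) :
    pvMinOpt (pvMinOpt a b) c = pvMinOpt a (pvMinOpt b c) := by
  cases a <;> cases b <;> cases c <;>
    (repeat' first | rfl | (exfalso; omega) | (simp only [pvMinOpt]) | split_ifs)

theorem pvChainMin (a0 a1 a2 a3 a4 a5 b0 b1 b2 b3 b4 b5 : Bool) :
    (if (a0 || b0) = true then some ((0:Int), "sideways_cluster")
     else if (a1 || b1) = true then some ((1:Int), "trigger_efficiency_cluster")
     else if (a2 || b2) = true then some ((2:Int), "post_breakdown_cluster")
     else if (a3 || b3) = true then some ((3:Int), "ownership_cluster")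
     else if (a4 || b4) = true then some ((4:Int), "participation_cluster")
     else if (a5 || b5) = true then some ((5:Int), "trigger_efficiency_cluster")
     else none)
    = pvMinOpt
      (if a0 = true then some ((0:Int), "sideways_cluster")
       else if a1 = true then some ((1:Int), "trigger_efficiency_cluster")
       else if a2 = true then some ((2:Int), "post_breakdown_cluster")
       else if a3 = true then some ((3:Int), "ownership_cluster")
       else if a4 = true then some ((4:Int), "participation_cluster")
       else if a5 = true then some ((5:Int), "trigger_efficiency_cluster")
       else none)
      (if b0 = true then some ((0:Int), "sideways_cluster")
       else if b1 = true then some ((1:Int), "trigger_efficiency_cluster")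
       else if b2 = true then some ((2:Int), "post_breakdown_cluster")
       else if b3 = true then some ((3:Int), "ownership_cluster")
       else if b4 = true then some ((4:Int), "participation_cluster")
       else if b5 = true then some ((5:Int), "trigger_efficiency_cluster")
       else none) := by
  revert a0 a1 a2 a3 a4 a5 b0 b1 b2 b3 b4 b5
  decide
theorem pvSpecMin_cons (x : String) (l : List String) :
    pvSpecMin (x :: l) = pvMinOpt (pvRankIf (PySem.Str.strip x)) (pvSpecMin l) := by
  simp only [pvSpecMin, pvCond, pvRankIf, List.any_cons]
  exact pvChainMin _ _ _ _ _ _ _ _ _ _ _ _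

theorem pvFold_best (l : List String) (acc : Option (Int × String)) :
    l.foldl pvB_bestStep acc = pvMinOpt acc (pvSpecMin l) := by
  induction l generalizing acc with
  | nil =>
    have h : pvSpecMin [] = none := by simp [pvSpecMin, pvCond]
    rw [List.foldl_nil, h]; cases acc <;> rfl
  | cons x l ih =>
    rw [List.foldl_cons, ih, pvStepEq, pvSpecMin_cons, ← pvMinOpt_assoc]

theorem pvInterNe (g : List String) (hg : "" ∉ g) (xs : List String) :
    (PySem.Set.inter (PySem.Set.ofList ((xs.map (fun item => PySem.Str.strip item)).filter (fun s => !(s == "")))) g ≠ [])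
      ↔ pvCond g xs = true := by
  rw [Ne, List.eq_nil_iff_forall_not_mem]
  push Not
  simp [PySem.Set.mem_inter, PySem.Set.mem_ofList, List.mem_filter, List.mem_map, pvCond,
    List.any_eq_true]
  constructor
  · rintro ⟨a, ⟨ha, -⟩, hm⟩; exact ⟨a, ha, hm⟩
  · rintro ⟨a, ha, hm⟩; exact ⟨a, ⟨ha, fun h => hg (h ▸ hm)⟩, hm⟩

theorem pvFamStep_eq : pvB_famStep = (fun (s : Bool × Bool) (it : String) =>
    (if (PySem.Str.strip it == "sideways") then true else s.1,
     if (!(PySem.Str.strip it == "sideways") && !(PySem.Str.strip it == "")) then true else s.2)) := by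
  funext s it
  simp only [pvB_famStep]
  split_ifs <;> simp_all

theorem pvFamFold (ys : List String) :
    ys.foldl pvB_famStep (false, false)
      = (ys.any (fun it => PySem.Str.strip it == "sideways"),
         ys.any (fun it => !(PySem.Str.strip it == "sideways") && !(PySem.Str.strip it == ""))) := by
  rw [pvFamStep_eq]
  rw [PySem.List.foldl_prod_mk (f := fun a it => if (PySem.Str.strip it == "sideways") then true else a)
      (g := fun a it => if (!(PySem.Str.strip it == "sideways") && !(PySem.Str.strip it == "")) then true else a)]
  rw [PySem.List.foldl_if_true_eq, PySem.List.foldl_if_true_eq]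
  simp

theorem pvFamEq (ys : List String) :
    PySem.Set.equal (PySem.Set.ofList ((ys.map (fun item => PySem.Str.strip item)).filter (fun s => !(s == "")))) ["sideways"]
      = ((ys.foldl pvB_famStep (false, false)).1 && !(ys.foldl pvB_famStep (false, false)).2) := by
  rw [pvFamFold]
  rw [Bool.eq_iff_iff, PySem.Set.equal_iff]
  simp [PySem.Set.mem_ofList, List.mem_filter, List.mem_map, List.any_eq_true]
  constructor
  · intro h
    refine ⟨(h "sideways").mpr rfl |>.1, ?_⟩
    intro it hit hne
    by_contra hne2
    exact hne ((h (PySem.Str.strip it)).mp ⟨⟨it, hit, rfl⟩, hne2⟩)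
  · rintro ⟨⟨it, hit, hsw⟩, hall⟩ x
    constructor
    · rintro ⟨⟨a, ha, rfl⟩, hne⟩
      by_contra hx
      exact hne (hall a ha hx)
    · rintro rfl
      exact ⟨⟨it, hit, hsw⟩, by decide⟩

-- ===== VERDICT (by name: the statement is the Claim_ definition above) =====
theorem system_cluster_key_from_regions_py_spec : Claim_equal_system_cluster_key_from_regions_py := by
  intro xs ys _
  unfold Spec_system_cluster_key_from_regions_py
  unfold system_cluster_key_from_regions_py system_cluster_key_from_regions_py_alt
  rw [pvFold_best]
  have hnone : ∀ o : Option (Int × String), pvMinOpt none o = o := fun o => rfl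
  rw [hnone]
  have hmatch : ∀ z : String,
      (match pvSpecMin xs with | some best => best.2 | none => z)
      = (if pvCond pvG0 xs then "sideways_cluster"
         else if pvCond pvG1 xs then "trigger_efficiency_cluster"
         else if pvCond pvG2 xs then "post_breakdown_cluster"
         else if pvCond pvG3 xs then "ownership_cluster"
         else if pvCond pvG4 xs then "participation_cluster"
         else if pvCond pvG5 xs then "trigger_efficiency_cluster"
         else z) := by
    intro z; simp only [pvSpecMin]; split_ifs <;> rfl
  rw [hmatch]
  simp only [pvInterNe ["_is_sideways_regime", "_sideways_release_flags"] (by decide) xs,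
    pvInterNe ["_flow_signal_metrics", "_flow_confirmation_ok", "_flow_entry_ok"] (by decide) xs,
    pvInterNe ["breakdown_ready", "short_breakdown_ok", "short_bounce_fail_ok"] (by decide) xs,
    pvInterNe ["long_final_veto_clear", "short_final_veto_clear", "_trend_followthrough_long", "_trend_followthrough_short"] (by decide) xs,
    pvInterNe ["long_outer_context_ok", "short_outer_context_ok"] (by decide) xs,
    pvInterNe ["long_breakout_ok", "long_pullback_ok", "long_signal_path_ok", "_long_entry_signal", "_short_entry_signal"] (by decide) xs,
    pvFamEq, pvG0, pvG1, pvG2, pvG3, pvG4, pvG5, pvCond]
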